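-- pv_equiv track=rewrite | github.com/Yopla38/OntoFlow | agent/Onto_wa_rag/provider/llm_providers.py | normalize_encoded_chars
-- ===== SOURCE A (Python) =====
-- def normalize_encoded_chars(text: str) -> str:
--     """
--     Remplace les caractères encodés (comme \xc3\xa9) par leurs équivalents Unicode.
--
--     Args:
--         text: Le texte à normaliser
--
--     Returns:
--         Le texte avec les caractères normalisés
--     """
--     # Dictionnaire des remplacements courants en français
--     replacements = {
--         "\\xc3\\xa9": "é",  # é
--         "\\xc3\\xa8": "è",  # è
--         "\\xc3\\xaa": "ê",  # ê
--         "\\xc3\\xa0": "à",  # à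
--         "\\xc3\\xa7": "ç",  # ç
--         "\\xc3\\xb4": "ô",  # ô
--         "\\xc3\\xae": "î",  # î
--         "\\xc3\\xbb": "û",  # û
--         "\\xc3\\xa2": "â",  # â
--         "\\xc3\\xab": "ë",  # ë
--         "\\xc3\\xaf": "ï",  # ï
--         "\\xc3\\xbc": "ü",  # ü
--         "\\xc3\\xb9": "ù",  # ù
--         "\\xc3\\xa4": "ä",  # ä
--         "\\xc3\\xb6": "ö",  # ö
--         "\\xc3\\x89": "É",  # É
--         "\\xc3\\x88": "È",  # È
--         "\\xc3\\x8a": "Ê",  # Ê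
--         "\\xc3\\x80": "À",  # À
--         "\\xc3\\x87": "Ç",  # Ç
--         "\\xc3\\x94": "Ô",  # Ô
--         "\\xc3\\x8e": "Î",  # Î
--         "\\xc3\\x9b": "Û",  # Û
--         "\\xc3\\x82": "Â",  # Â
--         "\\xc3\\x8b": "Ë",  # Ë
--         "\\xc3\\x8f": "Ï",  # Ï
--         "\\xc3\\x9c": "Ü",  # Ü
--         "\\xc3\\x99": "Ù",  # Ù
--         "\\xc3\\x84": "Ä",  # Ä
--         "\\xc3\\x96": "Ö",  # Ö
--     }
--
--     normalized_text = text
--     for encoded, decoded in replacements.items():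
--         normalized_text = normalized_text.replace(encoded, decoded)
--
--     return normalized_text
-- ===== SOURCE B (Python) =====
-- # Decode by the shared 6-char prefix "\xc3\x": one left-to-right scan that, at a
-- # prefix hit, looks up only the two trailing hex digits in a small dict (A runs 31
-- # sequential full-text .replace passes over 8-char keys).
--
-- _PREFIX = "\\xc3\\x"
-- _SUFFIX = {
--     "a9": "é", "a8": "è", "aa": "ê", "a0": "à", "a7": "ç", "b4": "ô",
--     "ae": "î", "bb": "û", "a2": "â", "ab": "ë", "af": "ï", "bc": "ü",
--     "b9": "ù", "a4": "ä", "b6": "ö", "89": "É", "88": "È", "8a": "Ê",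
--     "80": "À", "87": "Ç", "94": "Ô", "8e": "Î", "9b": "Û", "82": "Â",
--     "8b": "Ë", "8f": "Ï", "9c": "Ü", "99": "Ù", "84": "Ä", "96": "Ö",
-- }
--
--
-- def normalize_encoded_chars(text: str) -> str:
--     out = []
--     i = 0
--     n = len(text)
--     while i < n:
--         if text.startswith(_PREFIX, i):
--             dec = _SUFFIX.get(text[i + 6:i + 8])
--             if dec is not None:
--                 out.append(dec)
--                 i += 8
--                 continue
--         out.append(text[i])
--         i += 1
--     return "".join(out)
-- ===== Notes on version B (the rewrite author's own statement) =====
-- stated objective: alternative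
-- what changed: A runs 31 sequential full-text str.replace passes with 8-char keys; B exploits that all keys share the 6-char prefix "\xc3\x" and walks the text once, at each prefix hit looking up only the two trailing hex digits in a 30-entry dict (and copying a char otherwise), so one scan with a 2-char dict lookup replaces the 31 passes.
import Mathlib
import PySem

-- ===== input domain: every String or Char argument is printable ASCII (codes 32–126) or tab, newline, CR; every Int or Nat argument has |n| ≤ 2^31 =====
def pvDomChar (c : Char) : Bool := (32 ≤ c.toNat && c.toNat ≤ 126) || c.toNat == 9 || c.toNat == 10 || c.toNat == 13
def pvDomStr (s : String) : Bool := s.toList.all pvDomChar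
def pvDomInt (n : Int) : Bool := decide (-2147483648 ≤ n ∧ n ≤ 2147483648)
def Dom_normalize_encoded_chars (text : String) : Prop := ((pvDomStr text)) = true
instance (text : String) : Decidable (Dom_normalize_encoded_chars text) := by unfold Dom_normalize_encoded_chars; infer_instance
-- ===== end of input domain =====

-- B replaces A's 31 sequential full-text `.replace` passes by one left-to-right scan
-- that, at each hit of the shared 6-char prefix "\xc3\x", looks up only the two
-- trailing hex digits in a small dict (objective: alternative algorithm, same result).

-- ===== PORT A =====
-- A's replacements dict, in insertion order (its .items() sequence)
def pvRepl : List (String × String) :=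
  [("\\xc3\\xa9", "é"), ("\\xc3\\xa8", "è"), ("\\xc3\\xaa", "ê"),
   ("\\xc3\\xa0", "à"), ("\\xc3\\xa7", "ç"), ("\\xc3\\xb4", "ô"),
   ("\\xc3\\xae", "î"), ("\\xc3\\xbb", "û"), ("\\xc3\\xa2", "â"),
   ("\\xc3\\xab", "ë"), ("\\xc3\\xaf", "ï"), ("\\xc3\\xbc", "ü"),
   ("\\xc3\\xb9", "ù"), ("\\xc3\\xa4", "ä"), ("\\xc3\\xb6", "ö"),
   ("\\xc3\\x89", "É"), ("\\xc3\\x88", "È"), ("\\xc3\\x8a", "Ê"),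
   ("\\xc3\\x80", "À"), ("\\xc3\\x87", "Ç"), ("\\xc3\\x94", "Ô"),
   ("\\xc3\\x8e", "Î"), ("\\xc3\\x9b", "Û"), ("\\xc3\\x82", "Â"),
   ("\\xc3\\x8b", "Ë"), ("\\xc3\\x8f", "Ï"), ("\\xc3\\x9c", "Ü"),
   ("\\xc3\\x99", "Ù"), ("\\xc3\\x84", "Ä"), ("\\xc3\\x96", "Ö")]

-- A: normalized_text = text; for encoded, decoded in replacements.items(): .replace(...)
def normalize_encoded_chars (text : String) : String :=
  pvRepl.foldl (fun acc p => PySem.Str.replace acc p.1 p.2) text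

-- ===== PORT B =====
-- B's _PREFIX, at the List Char level (indexing/startswith work on code points)
def pvPrefixB : List Char := ['\\', 'x', 'c', '3', '\\', 'x']

-- B's _SUFFIX dict: the two trailing hex digits → the decoded char
def pvSuffB : List (List Char × List Char) :=
  [(['a','9'], ['é']), (['a','8'], ['è']), (['a','a'], ['ê']),
   (['a','0'], ['à']), (['a','7'], ['ç']), (['b','4'], ['ô']),
   (['a','e'], ['î']), (['b','b'], ['û']), (['a','2'], ['â']),
   (['a','b'], ['ë']), (['a','f'], ['ï']), (['b','c'], ['ü']),
   (['b','9'], ['ù']), (['a','4'], ['ä']), (['b','6'], ['ö']),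
   (['8','9'], ['É']), (['8','8'], ['È']), (['8','a'], ['Ê']),
   (['8','0'], ['À']), (['8','7'], ['Ç']), (['9','4'], ['Ô']),
   (['8','e'], ['Î']), (['9','b'], ['Û']), (['8','2'], ['Â']),
   (['8','b'], ['Ë']), (['8','f'], ['Ï']), (['9','c'], ['Ü']),
   (['9','9'], ['Ù']), (['8','4'], ['Ä']), (['9','6'], ['Ö'])]

-- B's while-loop: on a prefix hit, dict-get of the 2-char slice text[i+6:i+8]
-- (first association-list match); emit and skip 8 on success, else copy one char
def pvScanB : List Char → List Char
  | [] => []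
  | c :: t =>
    if pvPrefixB.isPrefixOf (c :: t) then
      match pvSuffB.find? (fun q => q.1 == (t.drop 5).take 2) with
      | some q => q.2 ++ pvScanB (t.drop 7)
      | none => c :: pvScanB t
    else c :: pvScanB t
termination_by s => s.length
decreasing_by
  all_goals (simp [List.length_drop]; try omega)

def normalize_encoded_chars_alt (text : String) : String :=
  String.ofList (pvScanB text.toList)

-- ===== PRECONDITION & SPEC =====
def Spec_normalize_encoded_chars (text : String) (out : String) : Prop := out = normalize_encoded_chars_alt text
instance (text : String) (out : String) : Decidable (Spec_normalize_encoded_chars text out) := by unfold Spec_normalize_encoded_chars; infer_instance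

-- ===== CLAIM (what is proved, stated in full; the proofs are below) =====
def Claim_equal_normalize_encoded_chars : Prop := ∀ (text : String), Dom_normalize_encoded_chars text → Spec_normalize_encoded_chars text (normalize_encoded_chars text)

-- ===== LEMMAS AND PROOFS =====

-- A's table at the List Char level, used only by the proofs below
def pvTable : List (List Char × List Char) :=
  pvRepl.map (fun p => (p.1.toList, p.2.toList))

lemma goAcc (old new : List Char) : ∀ (fuel : Nat) (l acc : List Char),
    PySem.Chars.replace.go old new fuel l acc = acc.reverse ++ PySem.Chars.replace.go old new fuel l [] := by
  intro fuel
  induction fuel with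
  | zero => intro l acc; simp [PySem.Chars.replace.go]
  | succ f ih =>
    intro l acc
    cases l with
    | nil => simp [PySem.Chars.replace.go]
    | cons c t =>
      simp only [PySem.Chars.replace.go]
      split
      · rw [ih _ (new.reverse ++ acc), ih _ (new.reverse ++ [])]; simp
      · rw [ih _ (c :: acc), ih _ (c :: [])]; simp

lemma goFuel (old new : List Char) (hold : old ≠ []) :
    ∀ (n : Nat) (l : List Char) (fuel fuel' : Nat), l.length ≤ n → l.length ≤ fuel → l.length ≤ fuel' →
    PySem.Chars.replace.go old new fuel l [] = PySem.Chars.replace.go old new fuel' l [] := by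
  intro n
  induction n with
  | zero =>
    intro l fuel fuel' hn _ _
    have : l = [] := List.eq_nil_of_length_eq_zero (Nat.le_zero.mp hn)
    subst this
    cases fuel <;> cases fuel' <;> simp [PySem.Chars.replace.go]
  | succ m ih =>
    intro l fuel fuel' hn hf hf'
    cases l with
    | nil => cases fuel <;> cases fuel' <;> simp [PySem.Chars.replace.go]
    | cons c t =>
      simp only [List.length_cons] at hn hf hf'
      obtain ⟨f, rfl⟩ : ∃ f, fuel = f + 1 := ⟨fuel - 1, by omega⟩
      obtain ⟨f', rfl⟩ : ∃ f', fuel' = f' + 1 := ⟨fuel' - 1, by omega⟩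
      simp only [PySem.Chars.replace.go]
      split
      · rw [goAcc _ _ f, goAcc _ _ f']
        congr 1
        have hk : 0 < old.length := List.length_pos_of_ne_nil hold
        have hlen : (List.drop old.length (c :: t)).length ≤ m := by
          simp [List.length_drop] at *; omega
        exact ih _ f f' hlen (by simp [List.length_drop] at *; omega) (by simp [List.length_drop] at *; omega)
      · rw [goAcc _ _ f, goAcc _ _ f']
        congr 1
        exact ih t f f' (by omega) (by omega) (by omega)

lemma pvReplaceStep (old new : List Char) (h : old ≠ []) (s : List Char) :
    PySem.Chars.replace s old new =
      if old.isPrefixOf s then new ++ PySem.Chars.replace (s.drop old.length) old new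
      else match s with | [] => [] | c :: t => c :: PySem.Chars.replace t old new := by
  have hne : old.isEmpty = false := by
    cases old with
    | nil => exact absurd rfl h
    | cons a b => rfl
  simp only [PySem.Chars.replace, hne, Bool.false_eq_true, if_false]
  cases s with
  | nil =>
    have : old.isPrefixOf ([] : List Char) = false := by
      cases old with
      | nil => exact absurd rfl h
      | cons a b => rfl
    simp [this, PySem.Chars.replace.go]
  | cons c t =>
    cases hpre : old.isPrefixOf (c :: t) with
    | true =>
      simp only [List.length_cons, PySem.Chars.replace.go, hpre, if_true]
      rw [goAcc]
      simp only [List.append_nil, List.reverse_reverse]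
      congr 1
      have hk : 0 < old.length := List.length_pos_of_ne_nil h
      apply goFuel old new h (List.drop old.length (c :: t)).length
      · rfl
      · simp [List.length_drop]; omega
      · rfl
    | false =>
      simp only [List.length_cons, PySem.Chars.replace.go, hpre, Bool.false_eq_true, if_false]
      rw [goAcc]
      simp

lemma pvReplace_append (k v : List Char) (hk : k ≠ []) :
    ∀ (pre u : List Char), (∀ j, j < pre.length → ¬ k <+: (pre.drop j ++ u)) →
    PySem.Chars.replace (pre ++ u) k v = pre ++ PySem.Chars.replace u k v := by
  intro pre
  induction pre with
  | nil => intro u _; simp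
  | cons c pre' ih =>
    intro u hno
    rw [pvReplaceStep k v hk]
    have h0 : k.isPrefixOf (c :: (pre' ++ u)) = false := by
      have := hno 0 (by simp)
      simp only [List.drop_zero] at this
      rw [Bool.eq_false_iff]
      intro hcontra
      exact this (by simpa using List.isPrefixOf_iff_prefix.mp hcontra)
    simp only [h0, Bool.false_eq_true, if_false, List.cons_append]
    have : PySem.Chars.replace (pre' ++ u) k v = pre' ++ PySem.Chars.replace u k v := by
      apply ih
      intro j hj
      have := hno (j+1) (by simp; omega)
      simpa using this
    rw [this]

lemma pvReplace_take (k : List Char) (d : Char) (hk : k ≠ []) :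
    ∀ (n : Nat) (s : List Char), s.length ≤ n → ∀ m,
      (PySem.Chars.replace s k [d]).take m = s.take m ∨ d ∈ (PySem.Chars.replace s k [d]).take m := by
  intro n
  induction n with
  | zero =>
    intro s hs m
    have : s = [] := List.eq_nil_of_length_eq_zero (Nat.le_zero.mp hs)
    subst this
    left
    rw [pvReplaceStep k [d] hk]
    have : k.isPrefixOf ([] : List Char) = false := by
      rw [Bool.eq_false_iff]
      intro hc
      exact hk (List.prefix_nil.mp (List.isPrefixOf_iff_prefix.mp hc))
    simp [this]
  | succ nn ih =>
    intro s hs m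
    rw [pvReplaceStep k [d] hk]
    cases hpre : k.isPrefixOf s with
    | true =>
      simp only [if_true, List.singleton_append]
      cases m with
      | zero => left; simp
      | succ m' => right; simp
    | false =>
      simp only [Bool.false_eq_true, if_false]
      cases s with
      | nil => left; rfl
      | cons c t =>
        cases m with
        | zero => left; simp
        | succ m' =>
          rcases ih t (by simp at hs; omega) m' with h | h
          · left; simp [List.take_succ_cons, h]
          · right; simp [List.take_succ_cons]; right; exact h

lemma pvFA : ∀ p ∈ pvTable, p.1.length = 8 ∧ p.2.length = 1 := by
  have h : (pvTable.all fun p => p.1.length == 8 && p.2.length == 1) = true := by rfl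
  simpa [List.all_eq_true] using h

lemma pvFB : ∀ p ∈ pvTable, ∀ q ∈ pvTable, ∀ c ∈ p.2, c ∉ q.1 := by
  have h : (pvTable.all fun p => pvTable.all fun q => p.2.all fun c => !q.1.contains c) = true := by rfl
  simpa [List.all_eq_true] using h

lemma pvFC : ∀ p ∈ pvTable, ∀ q ∈ pvTable, ∀ j, 1 ≤ j → j < 8 → p.1.take (8-j) ≠ q.1.drop j := by
  have h : (pvTable.all fun p => pvTable.all fun q =>
      (List.range 8).all fun j => j == 0 || !(p.1.take (8-j) == q.1.drop j)) = true := by rfl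
  simp only [List.all_eq_true, List.mem_range] at h
  intro p hp q hq j h1 h8
  have := h p hp q hq j h8
  simpa [Nat.pos_iff_ne_zero.mp h1] using this

lemma pvPrefix8 (q s : List Char) (hq : q.length = 8) : q <+: s ↔ s.take 8 = q := by
  rw [List.prefix_iff_eq_take, hq, eq_comm]

lemma pvFind?_ext {α : Type} (f g : α → Bool) :
    ∀ ts : List α, (∀ p ∈ ts, f p = g p) → ts.find? f = ts.find? g := by
  intro ts
  induction ts with
  | nil => intro _; rfl
  | cons a l ih =>
    intro h
    simp only [List.find?_cons]
    rw [h a (by simp)]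
    cases g a
    · exact ih (fun p hp => h p (by simp [hp]))
    · rfl

def pvScanG (ts : List (List Char × List Char)) : List Char → List Char
  | [] => []
  | c :: t =>
    match ts.find? (fun p => p.1.isPrefixOf (c :: t)) with
    | some p => p.2 ++ pvScanG ts (t.drop (p.1.length - 1))
    | none => c :: pvScanG ts t
termination_by s => s.length
decreasing_by
  all_goals (simp [List.length_drop]; try omega)

lemma pvScanG_cons (ts : List (List Char × List Char)) (c : Char) (t : List Char) :
    pvScanG ts (c :: t) = match ts.find? (fun p => p.1.isPrefixOf (c :: t)) with
      | some p => p.2 ++ pvScanG ts (t.drop (p.1.length - 1))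
      | none => c :: pvScanG ts t := by rw [pvScanG]

lemma pvScanG_nil (ts : List (List Char × List Char)) : pvScanG ts [] = [] := by rw [pvScanG]

lemma pvScanG_cons_some (ts : List (List Char × List Char)) (c : Char) (t : List Char)
    (p : List Char × List Char) (h : ts.find? (fun q => q.1.isPrefixOf (c :: t)) = some p) :
    pvScanG ts (c :: t) = p.2 ++ pvScanG ts (t.drop (p.1.length - 1)) := by
  rw [pvScanG_cons, h]

lemma pvScanG_cons_none (ts : List (List Char × List Char)) (c : Char) (t : List Char)
    (h : ts.find? (fun q => q.1.isPrefixOf (c :: t)) = none) :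
    pvScanG ts (c :: t) = c :: pvScanG ts t := by
  rw [pvScanG_cons, h]

lemma pvStar (k v : List Char) (ts : List (List Char × List Char))
    (hp : (k, v) ∈ pvTable) (hts : ∀ p ∈ ts, p ∈ pvTable) :
    ∀ (n : Nat) (s : List Char), s.length ≤ n →
      pvScanG ts (PySem.Chars.replace s k v) = pvScanG ((k, v) :: ts) s := by
  obtain ⟨hk8, hv1⟩ := pvFA (k, v) hp
  simp only at hk8 hv1
  obtain ⟨d, rfl⟩ := List.length_eq_one_iff.mp hv1
  have hkne : k ≠ [] := by intro hc; rw [hc] at hk8; simp at hk8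
  intro n
  induction n with
  | zero =>
    intro s hs
    have : s = [] := List.eq_nil_of_length_eq_zero (Nat.le_zero.mp hs)
    subst this
    rw [pvReplaceStep k [d] hkne]
    have hnp : k.isPrefixOf ([] : List Char) = false := by
      rw [Bool.eq_false_iff]; intro hc
      exact hkne (List.prefix_nil.mp (List.isPrefixOf_iff_prefix.mp hc))
    simp [hnp, pvScanG_nil]
  | succ nn ih =>
    intro s hs
    by_cases hpre : k <+: s
    -- Case A: k matches at position 0
    · have hpreB : k.isPrefixOf s = true := List.isPrefixOf_iff_prefix.mpr hpre
      have hs8 : 8 ≤ s.length := hk8 ▸ hpre.length_le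
      obtain ⟨c, t, rfl⟩ : ∃ c t, s = c :: t := by
        cases s with
        | nil => simp at hs8
        | cons c t => exact ⟨c, t, rfl⟩
      rw [pvReplaceStep k [d] hkne]
      simp only [hpreB, if_true, hk8, List.singleton_append]
      -- LHS: no key in ts starts with d
      have hfnone : ts.find? (fun p => p.1.isPrefixOf
          (d :: PySem.Chars.replace (List.drop 8 (c :: t)) k [d])) = none := by
        rw [List.find?_eq_none]
        intro q hq
        rw [Bool.not_eq_true, Bool.eq_false_iff]
        intro hc
        have hqpre := List.isPrefixOf_iff_prefix.mp hc
        obtain ⟨hq8, _⟩ := pvFA q (hts q hq)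
        obtain ⟨qh, qt, hqe⟩ : ∃ a l, q.1 = a :: l := by
          cases hqq : q.1 with
          | nil => rw [hqq] at hq8; simp at hq8
          | cons a l => exact ⟨a, l, rfl⟩
        rw [hqe, List.cons_prefix_cons] at hqpre
        have : d ∈ q.1 := by rw [hqe, hqpre.1]; simp
        exact pvFB (k, [d]) hp q (hts q hq) d (by simp) this
      rw [pvScanG_cons_none _ _ _ hfnone]
      -- RHS
      have hfcons : ((k, [d]) :: ts).find? (fun p => p.1.isPrefixOf (c :: t)) = some (k, [d]) := by
        simp [hpreB]
      rw [pvScanG_cons_some _ _ _ _ hfcons]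
      simp only [hk8, List.singleton_append]
      have hdrop : List.drop 7 t = List.drop 8 (c :: t) := by simp [List.drop_succ_cons]
      rw [hdrop]
      congr 1
      exact ih (List.drop 8 (c :: t)) (by simp [List.length_drop]; simp at hs; omega)
    -- k does not match at 0
    · have hpreB : k.isPrefixOf s = false := by
        rw [Bool.eq_false_iff]; intro hc; exact hpre (List.isPrefixOf_iff_prefix.mp hc)
      cases hf : ts.find? (fun p => p.1.isPrefixOf s) with
      | some p' =>
        -- Case B: some key of ts matches at 0
        obtain ⟨k', v'⟩ := p'
        have hmem : (k', v') ∈ ts := List.mem_of_find?_eq_some hf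
        have hk'pre : k' <+: s := List.isPrefixOf_iff_prefix.mp (by
          have := List.find?_some hf; simpa using this)
        obtain ⟨hk'8, hv'1⟩ := pvFA (k', v') (hts _ hmem)
        simp only at hk'8 hv'1
        obtain ⟨d', rfl⟩ := List.length_eq_one_iff.mp hv'1
        have hs8 : 8 ≤ s.length := hk'8 ▸ hk'pre.length_le
        have htake : s.take 8 = k' := (pvPrefix8 k' s hk'8).mp hk'pre
        have hsplit : s = k' ++ s.drop 8 := by
          conv_lhs => rw [← List.take_append_drop 8 s]
          rw [htake]
        -- step 1: replace skips over the k' occurrence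
        have hstep : PySem.Chars.replace s k [d] =
            k' ++ PySem.Chars.replace (s.drop 8) k [d] := by
          conv_lhs => rw [hsplit]
          apply pvReplace_append k [d] hkne
          intro j hj
          rw [hk'8] at hj
          intro hcon
          rcases Nat.eq_zero_or_pos j with hj0 | hj1
          · subst hj0
            simp only [List.drop_zero] at hcon
            exact hpre (hsplit ▸ hcon)
          · -- j ≥ 1: k.take (8-j) = k'.drop j contradicts pvFC
            have hlen : (List.drop j k').length = 8 - j := by simp [List.length_drop, hk'8]
            have hkt : k.take (8 - j) = List.drop j k' := by
              have h1 := List.prefix_iff_eq_take.mp hcon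
              rw [hk8] at h1
              have hmin : min (8 - j) 8 = 8 - j := by omega
              rw [h1, List.take_take, hmin, List.take_append, hlen, Nat.sub_self,
                List.take_zero, List.append_nil, List.take_of_length_le (le_of_eq hlen)]
            exact pvFC (k, [d]) hp (k', [d']) (hts _ hmem) j hj1 hj hkt
        rw [hstep]
        -- LHS scan over k' ++ X
        obtain ⟨c', t', hk'e⟩ : ∃ a l, k' = a :: l := by
          cases hkk : k' with
          | nil => rw [hkk] at hk'8; simp at hk'8
          | cons a l => exact ⟨a, l, rfl⟩
        have hfX : ts.find? (fun p => p.1.isPrefixOf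
            (k' ++ PySem.Chars.replace (s.drop 8) k [d])) = some (k', [d']) := by
          rw [pvFind?_ext _ (fun p => p.1.isPrefixOf s) ts, hf]
          intro q hq
          obtain ⟨hq8, _⟩ := pvFA q (hts q hq)
          have e1 : q.1.isPrefixOf (k' ++ PySem.Chars.replace (s.drop 8) k [d]) =
              decide (q.1 = k') := by
            rw [Bool.eq_iff_iff, List.isPrefixOf_iff_prefix, pvPrefix8 _ _ hq8,
              List.take_append_of_le_length (by omega), List.take_of_length_le (by omega)]
            simp [eq_comm]
          have e2 : q.1.isPrefixOf s = decide (q.1 = k') := by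
            rw [Bool.eq_iff_iff, List.isPrefixOf_iff_prefix, pvPrefix8 _ _ hq8, htake]
            simp [eq_comm]
          rw [e1, e2]
        rw [hk'e, List.cons_append,
          pvScanG_cons_some _ _ _ _ (by rw [← List.cons_append, ← hk'e]; exact hfX)]
        simp only [hk'8, List.singleton_append]
        have hdropX : List.drop 7 (t' ++ PySem.Chars.replace (s.drop 8) k [d]) =
            PySem.Chars.replace (s.drop 8) k [d] := by
          have ht'7 : t'.length = 7 := by
            have := hk'8; rw [hk'e] at this; simpa using this
          rw [← ht'7, List.drop_left]
        rw [hdropX]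
        -- RHS
        obtain ⟨c, t, rfl⟩ : ∃ c t, s = c :: t := by
          cases s with
          | nil => simp at hs8
          | cons c t => exact ⟨c, t, rfl⟩
        have hfR : ((k, [d]) :: ts).find? (fun p => p.1.isPrefixOf (c :: t)) = some (k', [d']) := by
          simp [hpreB, hf]
        rw [pvScanG_cons_some _ _ _ _ hfR]
        simp only [hk'8, List.singleton_append]
        have hdrop : List.drop 7 t = List.drop 8 (c :: t) := by simp [List.drop_succ_cons]
        rw [hdrop]
        congr 1
        exact ih (List.drop 8 (c :: t)) (by simp [List.length_drop]; simp at hs; omega)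
      | none =>
        -- Case C: nothing matches at 0
        cases s with
        | nil =>
          rw [pvReplaceStep k [d] hkne]
          have hnp : k.isPrefixOf ([] : List Char) = false := by
            rw [Bool.eq_false_iff]; intro hc
            exact hkne (List.prefix_nil.mp (List.isPrefixOf_iff_prefix.mp hc))
          simp [hnp, pvScanG_nil]
        | cons c t =>
          rw [pvReplaceStep k [d] hkne]
          simp only [hpreB, Bool.false_eq_true, if_false]
          have hfY : ts.find? (fun p => p.1.isPrefixOf (c :: PySem.Chars.replace t k [d])) = none := by
            rw [List.find?_eq_none]
            intro q hq
            rw [Bool.not_eq_true, Bool.eq_false_iff]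
            intro hc'
            have hqpre := List.isPrefixOf_iff_prefix.mp hc'
            obtain ⟨hq8, _⟩ := pvFA q (hts q hq)
            have hYlen : 8 ≤ (c :: PySem.Chars.replace t k [d]).length := hq8 ▸ hqpre.length_le
            have hq1 : q.1 = c :: (PySem.Chars.replace t k [d]).take 7 := by
              have := (pvPrefix8 _ _ hq8).mp hqpre
              rw [← this]; simp [List.take_succ_cons]
            rcases pvReplace_take k d hkne t.length t (le_refl _) 7 with heq | hd
            · -- take 7 agrees with t: q would have matched s itself
              have h7 : 7 ≤ t.length := by
                have h1 : (PySem.Chars.replace t k [d]).take 7 = t.take 7 := heq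
                have h2 : ((PySem.Chars.replace t k [d]).take 7).length = 7 := by
                  simp [List.length_take]
                  simp at hYlen
                  omega
                rw [h1] at h2
                simpa [List.length_take] using h2.symm.le.trans (by simp [List.length_take])
              have hqs : q.1 <+: c :: t := by
                rw [pvPrefix8 _ _ hq8]
                rw [hq1, heq]
                simp [List.take_succ_cons]
              have := List.find?_eq_none.mp hf q hq
              rw [Bool.not_eq_true, Bool.eq_false_iff] at this
              exact this (List.isPrefixOf_iff_prefix.mpr hqs)
            · -- d occurs among the first 7 chars: d would be in a key
              have : d ∈ q.1 := by
                rw [hq1]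
                exact List.mem_cons_of_mem _ hd
              exact pvFB (k, [d]) hp q (hts q hq) d (by simp) this
          rw [pvScanG_cons_none _ _ _ hfY]
          have hfR : ((k, [d]) :: ts).find? (fun p => p.1.isPrefixOf (c :: t)) = none := by
            simp only [List.find?_cons, hpreB]
            exact hf
          rw [pvScanG_cons_none _ _ _ hfR]
          congr 1
          exact ih t (by simp at hs; omega)

lemma pvScanG_empty_table : ∀ s, pvScanG [] s = s := by
  intro s
  induction s with
  | nil => exact pvScanG_nil []
  | cons c t ih => rw [pvScanG_cons_none [] c t (by rfl)]; rw [ih]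

lemma pvFoldl_eq : ∀ (ts : List (List Char × List Char)), (∀ p ∈ ts, p ∈ pvTable) →
    ∀ s, ts.foldl (fun acc p => PySem.Chars.replace acc p.1 p.2) s = pvScanG ts s := by
  intro ts
  induction ts with
  | nil => intro _ s; simp [pvScanG_empty_table]
  | cons p ts' ih =>
    intro hts s
    obtain ⟨k, v⟩ := p
    rw [List.foldl_cons]
    rw [ih (fun q hq => hts q (by simp [hq])) (PySem.Chars.replace s k v)]
    exact pvStar k v ts' (hts _ (by simp)) (fun q hq => hts q (by simp [hq])) s.length s (le_refl _)

-- ===== B-side bridging: pvScanB = pvScanG pvTable =====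

-- A's char-level table decomposes into B's shared prefix and suffix dict
lemma pvTable_decomp : pvTable = pvSuffB.map (fun q => (pvPrefixB ++ q.1, q.2)) := by decide

lemma pvSuffLen : ∀ q ∈ pvSuffB, q.1.length = 2 := by
  have h : (pvSuffB.all fun q => q.1.length == 2) = true := by rfl
  simpa [List.all_eq_true] using h

lemma pvScanB_nil : pvScanB [] = [] := by rw [pvScanB]

lemma pvScanB_cons (c : Char) (t : List Char) :
    pvScanB (c :: t) =
      if pvPrefixB.isPrefixOf (c :: t) then
        match pvSuffB.find? (fun q => q.1 == (t.drop 5).take 2) with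
        | some q => q.2 ++ pvScanB (t.drop 7)
        | none => c :: pvScanB t
      else c :: pvScanB t := by rw [pvScanB]

lemma isPrefixOf_append_eq (a b s : List Char) :
    (a ++ b).isPrefixOf s = (a.isPrefixOf s && b.isPrefixOf (s.drop a.length)) := by
  induction a generalizing s with
  | nil => simp
  | cons x a ih =>
    cases s with
    | nil => simp [List.isPrefixOf]
    | cons y t => simp [List.isPrefixOf, ih, Bool.and_assoc]

lemma isPrefixOf_eq_beq_take (a l : List Char) :
    a.isPrefixOf l = (a == l.take a.length) := by
  rw [Bool.eq_iff_iff, beq_iff_eq, List.isPrefixOf_iff_prefix, List.prefix_iff_eq_take]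

-- the table's find? over 8-char keys = prefix test + suffix dict-get
lemma pvTableFind (s : List Char) :
    pvTable.find? (fun p => p.1.isPrefixOf s) =
      if pvPrefixB.isPrefixOf s then
        (pvSuffB.find? (fun q => q.1 == (s.drop 6).take 2)).map
          (fun q => (pvPrefixB ++ q.1, q.2))
      else none := by
  rw [pvTable_decomp, List.find?_map]
  cases hpre : pvPrefixB.isPrefixOf s with
  | true =>
    simp only [if_true]
    congr 1
    apply pvFind?_ext
    intro q hq
    have h2 := pvSuffLen q hq
    simp only [Function.comp]
    rw [isPrefixOf_append_eq, hpre, Bool.true_and,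
      isPrefixOf_eq_beq_take, h2]
    rfl
  | false =>
    simp only [Bool.false_eq_true, if_false]
    have hnone : List.find? ((fun p => p.1.isPrefixOf s) ∘ fun q => (pvPrefixB ++ q.1, q.2))
        pvSuffB = none := by
      rw [List.find?_eq_none]
      intro q _
      simp only [Function.comp]
      rw [isPrefixOf_append_eq, hpre]
      simp
    rw [hnone]
    rfl

lemma pvScanB_eq_scanG : ∀ (n : Nat) (s : List Char), s.length ≤ n →
    pvScanB s = pvScanG pvTable s := by
  intro n
  induction n with
  | zero =>
    intro s hs
    have : s = [] := List.eq_nil_of_length_eq_zero (Nat.le_zero.mp hs)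
    subst this
    rw [pvScanB_nil, pvScanG_nil]
  | succ nn ih =>
    intro s hs
    cases s with
    | nil => rw [pvScanB_nil, pvScanG_nil]
    | cons c t =>
      rw [pvScanB_cons, pvScanG_cons, pvTableFind]
      have hdrop6 : (c :: t).drop 6 = t.drop 5 := by simp [List.drop_succ_cons]
      rw [hdrop6]
      cases hpre : pvPrefixB.isPrefixOf (c :: t) with
      | true =>
        simp only [if_true]
        cases hfind : pvSuffB.find? (fun q => q.1 == (t.drop 5).take 2) with
        | some q =>
          simp only [Option.map_some]
          have h2 := pvSuffLen q (List.mem_of_find?_eq_some hfind)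
          show q.2 ++ pvScanB (t.drop 7) =
            q.2 ++ pvScanG pvTable (t.drop ((pvPrefixB ++ q.1).length - 1))
          have hlen : (pvPrefixB ++ q.1).length - 1 = 7 := by
            simp [List.length_append, h2]; rfl
          rw [hlen]
          congr 1
          exact ih _ (by simp at hs ⊢; omega)
        | none =>
          simp only [Option.map_none]
          show c :: pvScanB t = c :: pvScanG pvTable t
          congr 1
          exact ih t (by simp at hs; omega)
      | false =>
        simp only [Bool.false_eq_true, if_false]
        show c :: pvScanB t = c :: pvScanG pvTable t
        congr 1
        exact ih t (by simp at hs; omega)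

lemma pvStrFold : ∀ (l : List (String × String)) (s : String),
    (l.foldl (fun acc p => PySem.Str.replace acc p.1 p.2) s).toList =
    (l.map (fun p => (p.1.toList, p.2.toList))).foldl
      (fun acc p => PySem.Chars.replace acc p.1 p.2) s.toList := by
  intro l
  induction l with
  | nil => intro s; rfl
  | cons p l ih =>
    intro s
    simp only [List.foldl_cons, List.map_cons]
    rw [ih]
    congr 1
    simp [pysem]

-- ===== VERDICT (by name: the statement is the Claim_ definition above) =====
theorem normalize_encoded_chars_spec : Claim_equal_normalize_encoded_chars := by
  intro text _
  unfold Spec_normalize_encoded_chars normalize_encoded_chars normalize_encoded_chars_alt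
  rw [pvScanB_eq_scanG text.toList.length text.toList (le_refl _)]
  rw [← pvFoldl_eq pvTable (fun p hp => hp) text.toList]
  have h := pvStrFold pvRepl text
  rw [show (pvRepl.map fun p => (p.1.toList, p.2.toList)) = pvTable from rfl] at h
  rw [← h, String.ofList_toList]
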